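-- pv_equiv track=rewrite | github.com/joshanashakya/dissertation | workspace/dataset/java-python/GeeksForGeeks/4770/A/2.py | andSum
-- ===== SOURCE A (Python) =====
-- BITS = 32;
--
-- def andSum(arr, n):
--     ans = 0
--
--     # assuming representation
--     # of each element is
--     # in 32 bit
--     for i in range(0, BITS):
--         countSetBits = 0
--
--         # iterating array element
--         for j in range(0, n) :
--
--             # Counting the set bit
--             # of array in ith
--             # position
--             if (arr[j] & (1 << i)) :
--                 countSetBits = (countSetBits
--                                        + 1)
--
--         # counting subset which
--         # produce sum when
--         # particular bit position
--         # is set.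
--         subset = ((1 << countSetBits)
--                                  - 1)
--
--         # multiplying every position
--         # subset with 2^i to count
--         # the sum.
--         subset = (subset * (1 << i))
--
--         ans = ans + subset
--
--     return ans
-- ===== SOURCE B (Python) =====
-- BITS = 32
--
-- def andSum(arr, n):
--     # Streaming algorithm: a single pass over the elements; each element's
--     # 32-bit two's-complement value is consumed by shifting it down to zero,
--     # and when bit position i is seen for the (c+1)-th time the running answer
--     # grows by 2^c << i (using 2^(c+1)-1 = (2^c-1) + 2^c), so no per-bit rescan
--     # of the array and no closed-form summarizing pass is needed.
--     cnt = [0] * BITS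
--     ans = 0
--     for j in range(n):
--         y = arr[j] & 0xFFFFFFFF   # low 32 bits, two's complement
--         i = 0
--         while y:
--             if y & 1:
--                 ans += (1 << cnt[i]) << i
--                 cnt[i] += 1
--             y >>= 1
--             i += 1
--     return ans
-- ===== Notes on version B (the rewrite author's own statement) =====
-- stated objective: alternative
-- what changed: B replaces A's 32 per-bit rescans of the array and closed-form (2^count-1)<<i terms by a streaming single pass: each element's 32-bit value is shifted down to zero and every set bit immediately adds its marginal contribution 2^c << i (via 2^(c+1)-1 = (2^c-1)+2^c) to a running answer.
import Mathlib
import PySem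

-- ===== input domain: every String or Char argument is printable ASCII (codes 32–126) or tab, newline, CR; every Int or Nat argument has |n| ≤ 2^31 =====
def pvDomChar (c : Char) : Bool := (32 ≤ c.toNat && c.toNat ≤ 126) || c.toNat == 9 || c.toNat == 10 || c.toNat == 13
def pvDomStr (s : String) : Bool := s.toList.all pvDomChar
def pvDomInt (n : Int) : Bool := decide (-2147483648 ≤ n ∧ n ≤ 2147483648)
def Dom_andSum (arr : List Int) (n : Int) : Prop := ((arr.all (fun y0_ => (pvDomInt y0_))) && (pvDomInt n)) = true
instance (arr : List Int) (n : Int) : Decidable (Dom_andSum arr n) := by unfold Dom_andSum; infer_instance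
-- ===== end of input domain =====

-- B replaces A's 32 per-bit rescans of the array (each followed by a closed-form
-- (2^count - 1) << i term) by one streaming pass: every element's 32-bit value is
-- shifted down to zero and each set bit immediately adds its marginal contribution
-- (1 << count) << i to a running answer (objective: alternative algorithm, same asymptotic cost).

-- ===== PORT A =====
-- Literal port of A: for each bit position i, rescan arr[0..n-1] counting set bits.
-- '1 << i' is '1 <<< i.toNat' (exact: 0 ≤ i < 32), '1 << countSetBits' likewise
-- (countSetBits never decreases below its start 0, so toNat is exact).
def andSum (arr : List Int) (n : Int) : Int :=
  (PySem.List.pyRange 0 32).foldl (fun ans i =>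
    let countSetBits : Int :=
      (PySem.List.pyRange 0 n).foldl (fun c j =>
        if PySem.Int.band (PySem.List.pyGetD arr j 0) (1 <<< i.toNat) ≠ 0 then c + 1 else c) 0
    let subset := ((1 : Int) <<< countSetBits.toNat) - 1
    let subset := subset * (1 <<< i.toNat)
    ans + subset) 0

-- ===== PORT B =====
-- Source B's inner while loop: shift y down to zero; whenever the low bit is set, bump
-- the running answer by (1 << cnt[i]) << i and the count cnt[i].  On every reachable
-- call y < 2^32 and i starts at 0, so the touched indices stay below 32 and the
-- total List.getD / List.modify are exact for Python's cnt[i] reads and writes.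
def pvStrip (y : Nat) (i : Nat) (ans : Int) (cnt : List Int) : Int × List Int :=
  if hy : y = 0 then (ans, cnt)
  else if y &&& 1 ≠ 0 then
    pvStrip (y >>> 1) (i + 1) (ans + ((1 : Int) <<< (cnt.getD i 0).toNat) <<< i) (cnt.modify i (· + 1))
  else
    pvStrip (y >>> 1) (i + 1) ans cnt
termination_by y
decreasing_by all_goals
  simpa [Nat.shiftRight_one] using Nat.div_lt_self (Nat.pos_of_ne_zero hy) one_lt_two

def andSum_alt (arr : List Int) (n : Int) : Int :=
  ((PySem.List.pyRange 0 n).foldl (fun st j =>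
      -- y = arr[j] & 0xFFFFFFFF lies in [0, 2^32), so .toNat is exact
      pvStrip (PySem.Int.band (PySem.List.pyGetD arr j 0) 0xFFFFFFFF).toNat 0 st.1 st.2)
    ((0 : Int), List.replicate 32 (0 : Int))).1

-- ===== PRECONDITION & SPEC =====
-- A indexes arr[j] for j in range(0, n): it raises IndexError exactly when n > len(arr).
def Pre_andSum (arr : List Int) (n : Int) : Prop := n ≤ (arr.length : Int)
instance (arr : List Int) (n : Int) : Decidable (Pre_andSum arr n) := by unfold Pre_andSum; infer_instance
def pvWitness_andSum : List Int × Int := ([3, -5, 12], 3)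

def Spec_andSum (arr : List Int) (n : Int) (out : Int) : Prop := out = andSum_alt arr n
instance (arr : List Int) (n : Int) (out : Int) : Decidable (Spec_andSum arr n out) := by unfold Spec_andSum; infer_instance

-- ===== CLAIM (what is proved, stated in full; the proofs are below) =====
def Claim_equal_andSum : Prop := ∀ (arr : List Int) (n : Int), Dom_andSum arr n → Pre_andSum arr n → Spec_andSum arr n (andSum arr n)

-- ===== LEMMAS AND PROOFS =====

-- (1 : ℤ) <<< k = 2 ^ k for a Nat shift amount
theorem pv_one_shl (k : Nat) : (1 : Int) <<< k = (2 : Int) ^ k := by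
  rw [Int.shiftLeft_eq, one_mul]

-- a List.range sum is a Finset.range sum (definitional)
theorem pv_sum_range (f : Nat → Int) (n : Nat) :
    ((List.range n).map f).sum = ∑ i ∈ Finset.range n, f i := rfl

-- the two guard shapes met when pvStrip recurses: same condition one bit down (m ≠ i)
theorem pv_ite_shift (i m y : Nat) (C : Int) (hmi : ¬ m = i) :
    (if i + 1 ≤ m ∧ (y >>> 1).testBit (m - (i + 1)) then C else 0)
      = if i ≤ m ∧ y.testBit (m - i) then C else 0 := by
  by_cases hgt : i < m
  · have h3 : m - i = (m - (i + 1)) + 1 := by omega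
    rw [h3, Nat.testBit_succ, ← Nat.shiftRight_one]
    have h4 : i ≤ m := by omega
    have h5 : i + 1 ≤ m := hgt
    simp [h4, h5]
  · rw [if_neg (fun h => (by omega : ¬ i + 1 ≤ m) h.1),
        if_neg (fun h => (by omega : ¬ i ≤ m) h.1)]

-- a 'for j in range(0, n): … arr[j] …' loop with n ≤ len(arr) is a fold over arr.take n
theorem foldl_pyRange_take {β : Type} (arr : List Int) (n : Int) (hn : n ≤ (arr.length : Int))
    (f : β → Int → β) (init : β) :
    (PySem.List.pyRange 0 n).foldl (fun acc j => f acc (PySem.List.pyGetD arr j 0)) init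
      = (arr.take n.toNat).foldl f init := by
  by_cases h : n ≤ 0
  · rw [PySem.List.pyRange_one_eq_nil h]
    have h0 : n.toNat = 0 := by omega
    simp [h0]
  · have hpos : 0 < n := not_le.mp h
    set xs := arr.take n.toNat with hxs
    have hlen : (xs.length : Int) = n := by
      simp [hxs, List.length_take]; omega
    rw [PySem.List.foldl_congr_mem _ _
        (fun acc j => f acc (PySem.List.pyGetD xs j 0)) init ?_]
    · rw [← hlen]
      exact PySem.List.foldl_pyRange_zero_pyGetD' xs 0 f init
    · intro acc j hj
      rcases PySem.List.mem_pyRange_one.mp hj with ⟨hj0, hjn⟩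
      have hjl : j < (arr.length : Int) := lt_of_lt_of_le hjn hn
      have hjt : j < (xs.length : Int) := by rw [hlen]; exact hjn
      show f acc (PySem.List.pyGetD arr j 0) = f acc (PySem.List.pyGetD xs j 0)
      rw [PySem.List.pyGetD_eq_getElem arr 0 hj0 hjl,
          PySem.List.pyGetD_eq_getElem xs 0 hj0 hjt]
      congr 1
      simp only [hxs]
      exact (List.getElem_take).symm

-- A's inner loop counts the elements of arr.take n with bit i set
theorem countA_eq (arr : List Int) (n : Int) (hn : n ≤ (arr.length : Int)) (b : Nat) :
    (PySem.List.pyRange 0 n).foldl (fun c j =>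
        if PySem.Int.band (PySem.List.pyGetD arr j 0) ((1:Int) <<< b) ≠ 0 then c + 1 else c) 0
      = ((arr.take n.toNat).countP (fun x => decide (PySem.Int.band x ((1:Int) <<< b) ≠ 0)) : Int) := by
  rw [foldl_pyRange_take arr n hn
      (fun c x => if PySem.Int.band x ((1:Int) <<< b) ≠ 0 then c + 1 else c) 0]
  have := PySem.List.foldl_count_if
      (fun x => decide (PySem.Int.band x ((1:Int) <<< b) ≠ 0)) (arr.take n.toNat) 0
  simpa using this

-- A as a closed 32-term sum
theorem andSum_eq_sum (arr : List Int) (n : Int) (hn : n ≤ (arr.length : Int)) :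
    andSum arr n = ∑ m ∈ Finset.range 32,
      ((2:Int) ^ ((arr.take n.toNat).countP (fun x => decide (PySem.Int.band x ((1:Int) <<< m) ≠ 0))) - 1) * 2 ^ m := by
  unfold andSum
  rw [show (32:Int) = ((32:Nat):Int) by norm_num, PySem.List.pyRange_zero_natCast, List.foldl_map]
  rw [PySem.List.foldl_congr_mem (List.range 32) _
      (fun (ans : Int) (k : Nat) => ans +
        ((2:Int) ^ ((arr.take n.toNat).countP (fun x => decide (PySem.Int.band x ((1:Int) <<< k) ≠ 0))) - 1) * 2 ^ k)
      0 ?_]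
  · rw [PySem.List.foldl_add, pv_sum_range]
    simp
  · intro acc k _
    show acc + (((1:Int) <<< (((PySem.List.pyRange 0 n).foldl (fun (c : Int) (j : Int) =>
          if PySem.Int.band (PySem.List.pyGetD arr j 0) ((1:Int) <<< k) ≠ 0 then c + 1 else c) (0:Int)).toNat) - 1)
        * ((1:Int) <<< k))
      = acc + ((2:Int) ^ ((arr.take n.toNat).countP (fun x => decide (PySem.Int.band x ((1:Int) <<< k) ≠ 0))) - 1) * 2 ^ k
    rw [countA_eq arr n hn k, Int.toNat_natCast, pv_one_shl, pv_one_shl]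

-- the complement law behind Python's '& 0xFFFFFFFF' on negative ints:
-- below bit n, 2^n - 1 - a % 2^n carries exactly the complemented bits of a
theorem pv_compl_testBit (m : Nat) : ∀ (n a : Nat), m < n →
    (2 ^ n - 1 - a % 2 ^ n).testBit m = !a.testBit m := by
  induction m with
  | zero =>
    intro n a hn
    rw [Nat.testBit_zero, Nat.testBit_zero]
    have h1 : a % 2 ^ n % 2 = a % 2 := Nat.mod_mod_of_dvd a (dvd_pow_self 2 (by omega))
    have h2 : a % 2 ^ n < 2 ^ n := Nat.mod_lt _ (by positivity)
    have h3 : 2 ^ n % 2 = 0 := by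
      have h4 : (2:Nat) ∣ 2 ^ n := dvd_pow_self 2 (by omega)
      omega
    rcases Nat.mod_two_eq_zero_or_one a with h | h
    · have hg : (2 ^ n - 1 - a % 2 ^ n) % 2 = 1 := by omega
      simp [hg, h]
    · have hg : (2 ^ n - 1 - a % 2 ^ n) % 2 = 0 := by omega
      simp [hg, h]
  | succ m ihm =>
    intro n a hn
    obtain ⟨n', rfl⟩ : ∃ n', n = n' + 1 := ⟨n - 1, by omega⟩
    rw [Nat.testBit_succ, Nat.testBit_succ]
    have key : (2 ^ (n' + 1) - 1 - a % 2 ^ (n' + 1)) / 2 = 2 ^ n' - 1 - (a / 2) % 2 ^ n' := by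
      have h2 : a % 2 ^ (n' + 1) < 2 ^ (n' + 1) := Nat.mod_lt _ (by positivity)
      have hdiv : (a % 2 ^ (n' + 1)) / 2 = (a / 2) % 2 ^ n' := by
        have h5 := Nat.mod_mul_right_div_self a 2 (2 ^ n')
        rw [← h5]
        congr 1
        rw [pow_succ]; ring
      have hE : 2 ^ (n' + 1) = 2 * 2 ^ n' := by rw [pow_succ]; ring
      generalize 2 ^ n' = E at *
      generalize 2 ^ (n' + 1) = F at *
      omega
    rw [key]
    exact ihm n' (a / 2) (by omega)

-- masking keeps the value below 2^32
theorem pv_mask_lt (x : Int) : (PySem.Int.band x 0xFFFFFFFF).toNat < 2 ^ 32 := by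
  unfold PySem.Int.band
  split_ifs with h1 h2 h2
  · simp only [Int.toNat_natCast]
    exact lt_of_le_of_lt Nat.and_le_right (by norm_num)
  · exact absurd (by norm_num) h2
  · simp only [Int.toNat_natCast]
    have h5 := Nat.sub_le ((0xFFFFFFFF:Int)).toNat (((0xFFFFFFFF:Int)).toNat &&& (-x - 1).toNat)
    have h6 : ((0xFFFFFFFF:Int)).toNat = 4294967295 := rfl
    omega
  · exact absurd (by norm_num) h2

-- bit m of the masked value is A's test 'x & (1 << m) != 0' (m < 32)
theorem pv_bridge (x : Int) (m : Nat) (hm : m < 32) :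
    (PySem.Int.band x 0xFFFFFFFF).toNat.testBit m
      = decide (PySem.Int.band x ((1:Int) <<< m) ≠ 0) := by
  have hshl : (1:Int) <<< m = ((2 ^ m : Nat) : Int) := by
    rw [pv_one_shl]; push_cast; ring
  have hM : ((0xFFFFFFFF:Int)).toNat = 2 ^ 32 - 1 := by
    have h : ((0xFFFFFFFF:Int)).toNat = 4294967295 := rfl
    rw [h]; norm_num
  rcases le_or_gt 0 x with hx | hx
  · have h1 : PySem.Int.band x 0xFFFFFFFF = ((x.toNat &&& (2 ^ 32 - 1) : Nat) : Int) := by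
      unfold PySem.Int.band
      rw [if_pos hx, if_pos (by norm_num : (0:Int) ≤ 0xFFFFFFFF), hM]
    have h2 : PySem.Int.band x ((1:Int) <<< m) = ((x.toNat &&& 2 ^ m : Nat) : Int) := by
      rw [hshl]
      unfold PySem.Int.band
      rw [if_pos hx, if_pos (by positivity), Int.toNat_natCast]
    rw [h1, h2, Int.toNat_natCast, Nat.and_two_pow_sub_one_eq_mod, Nat.testBit_mod_two_pow,
        Nat.and_two_pow]
    rcases h : x.toNat.testBit m <;> simp [h, hm, pow_ne_zero]
  · have hx' : ¬ 0 ≤ x := not_le.mpr hx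
    have h1 : PySem.Int.band x 0xFFFFFFFF
        = (((2 ^ 32 - 1) - ((2 ^ 32 - 1) &&& (-x - 1).toNat) : Nat) : Int) := by
      unfold PySem.Int.band
      rw [if_neg hx', if_pos (by norm_num : (0:Int) ≤ 0xFFFFFFFF), hM]
    have h2 : PySem.Int.band x ((1:Int) <<< m)
        = ((2 ^ m - (2 ^ m &&& (-x - 1).toNat) : Nat) : Int) := by
      rw [hshl]
      unfold PySem.Int.band
      rw [if_neg hx', if_pos (by positivity), Int.toNat_natCast]
    rw [h1, h2, Int.toNat_natCast, Nat.and_comm, Nat.and_two_pow_sub_one_eq_mod,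
        pv_compl_testBit m 32 _ hm, Nat.and_comm, Nat.and_two_pow]
    rcases h : (-x - 1).toNat.testBit m <;> simp [h, pow_ne_zero]

-- pvStrip: length, nonnegativity, entries and first-component characterisations
theorem pvStrip_length (y : Nat) : ∀ (i : Nat) (ans : Int) (cnt : List Int),
    (pvStrip y i ans cnt).2.length = cnt.length := by
  induction y using Nat.strong_induction_on with
  | _ y ih =>
    intro i ans cnt
    by_cases hy : y = 0
    · rw [pvStrip, dif_pos hy]
    · have hlt : y >>> 1 < y := by
        simpa [Nat.shiftRight_one] using Nat.div_lt_self (Nat.pos_of_ne_zero hy) one_lt_two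
      rw [pvStrip, dif_neg hy]
      by_cases hb : y &&& 1 ≠ 0
      · rw [if_pos hb, ih _ hlt]
        exact List.length_modify ..
      · rw [if_neg hb, ih _ hlt]

theorem pvStrip_nonneg (y : Nat) : ∀ (i : Nat) (ans : Int) (cnt : List Int),
    (∀ m : Nat, 0 ≤ cnt.getD m 0) → ∀ m : Nat, 0 ≤ (pvStrip y i ans cnt).2.getD m 0 := by
  induction y using Nat.strong_induction_on with
  | _ y ih =>
    intro i ans cnt h m
    by_cases hy : y = 0
    · rw [pvStrip, dif_pos hy]; exact h m
    · have hlt : y >>> 1 < y := by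
        simpa [Nat.shiftRight_one] using Nat.div_lt_self (Nat.pos_of_ne_zero hy) one_lt_two
      rw [pvStrip, dif_neg hy]
      by_cases hb : y &&& 1 ≠ 0
      · rw [if_pos hb]
        refine ih _ hlt _ _ _ (fun m' => ?_) m
        by_cases hm' : m' < cnt.length
        · have hm'' : m' < (cnt.modify i (· + 1)).length := by
            rw [List.length_modify]; exact hm'
          rw [List.getD_eq_getElem _ _ hm'', List.getElem_modify]
          have h0 := h m'
          rw [List.getD_eq_getElem _ _ hm'] at h0
          split_ifs with hi
          · omega
          · exact h0
        · rw [List.getD_eq_default _ _ (by rw [List.length_modify]; omega)]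
      · rw [if_neg hb]
        exact ih _ hlt _ _ _ h m

theorem pvStrip_getD (y : Nat) : ∀ (i : Nat) (ans : Int) (cnt : List Int) (m : Nat),
    y < 2 ^ (cnt.length - i) → m < cnt.length →
    (pvStrip y i ans cnt).2.getD m 0
      = cnt.getD m 0 + (if i ≤ m ∧ y.testBit (m - i) then 1 else 0) := by
  induction y using Nat.strong_induction_on with
  | _ y ih =>
    intro i ans cnt m hL hm
    by_cases hy : y = 0
    · subst hy
      rw [pvStrip, dif_pos rfl]
      simp [Nat.zero_testBit]
    · have hlt : y >>> 1 < y := by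
        simpa [Nat.shiftRight_one] using Nat.div_lt_self (Nat.pos_of_ne_zero hy) one_lt_two
      have hiL : i < cnt.length := by
        by_contra hc
        have h0 : cnt.length - i = 0 := by omega
        rw [h0, pow_zero] at hL
        omega
      have hLs : y >>> 1 < 2 ^ (cnt.length - (i + 1)) := by
        have h1 : cnt.length - i = (cnt.length - (i + 1)) + 1 := by omega
        rw [h1, pow_succ] at hL
        rw [Nat.shiftRight_one]
        omega
      rw [pvStrip, dif_neg hy]
      by_cases hb : y &&& 1 ≠ 0
      · have hbit0 : y.testBit 0 = true := by
          rw [Nat.and_one_is_mod] at hb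
          rw [Nat.testBit_zero]
          simp [(by omega : y % 2 = 1)]
        rw [if_pos hb,
            ih _ hlt _ _ _ m (by rw [List.length_modify]; exact hLs)
              (by rw [List.length_modify]; exact hm)]
        by_cases hmi : m = i
        · subst hmi
          rw [List.getD_eq_getElem _ _ (by rw [List.length_modify]; exact hm),
              List.getElem_modify, if_pos rfl, ← List.getD_eq_getElem cnt 0 hm]
          simp [hbit0, (by omega : ¬ m + 1 ≤ m)]
        · rw [List.getD_eq_getElem _ _ (by rw [List.length_modify]; exact hm),
              List.getElem_modify, if_neg (fun h => hmi h.symm), ← List.getD_eq_getElem cnt 0 hm,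
              pv_ite_shift i m y 1 hmi]
      · have hbit0 : y.testBit 0 = false := by
          rw [Nat.and_one_is_mod] at hb
          rw [Nat.testBit_zero]
          simp [(by omega : y % 2 = 0)]
        rw [if_neg hb, ih _ hlt _ _ _ m hLs hm]
        congr 1
        by_cases hmi : m = i
        · subst hmi
          rw [if_neg (fun h => (by omega : ¬ m + 1 ≤ m) h.1),
              if_neg (by simp [hbit0])]
        · exact pv_ite_shift i m y 1 hmi

theorem pvStrip_fst (y : Nat) : ∀ (i : Nat) (ans : Int) (cnt : List Int),
    y < 2 ^ (cnt.length - i) →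
    (pvStrip y i ans cnt).1
      = ans + ∑ m ∈ Finset.range cnt.length,
          (if i ≤ m ∧ y.testBit (m - i) then (2:Int) ^ (cnt.getD m 0).toNat * 2 ^ m else 0) := by
  induction y using Nat.strong_induction_on with
  | _ y ih =>
    intro i ans cnt hL
    by_cases hy : y = 0
    · subst hy
      rw [pvStrip, dif_pos rfl]
      simp [Nat.zero_testBit]
    · have hlt : y >>> 1 < y := by
        simpa [Nat.shiftRight_one] using Nat.div_lt_self (Nat.pos_of_ne_zero hy) one_lt_two
      have hiL : i < cnt.length := by
        by_contra hc
        have h0 : cnt.length - i = 0 := by omega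
        rw [h0, pow_zero] at hL
        omega
      have hLs : y >>> 1 < 2 ^ (cnt.length - (i + 1)) := by
        have h1 : cnt.length - i = (cnt.length - (i + 1)) + 1 := by omega
        rw [h1, pow_succ] at hL
        rw [Nat.shiftRight_one]
        omega
      rw [pvStrip, dif_neg hy]
      by_cases hb : y &&& 1 ≠ 0
      · have hbit0 : y.testBit 0 = true := by
          rw [Nat.and_one_is_mod] at hb
          rw [Nat.testBit_zero]
          simp [(by omega : y % 2 = 1)]
        rw [if_pos hb,
            ih _ hlt _ _ _ (by rw [List.length_modify]; exact hLs), List.length_modify]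
        have hsum : ∀ m ∈ Finset.range cnt.length,
            (if i ≤ m ∧ y.testBit (m - i) then (2:Int) ^ (cnt.getD m 0).toNat * 2 ^ m else 0)
            = (if i + 1 ≤ m ∧ (y >>> 1).testBit (m - (i + 1))
                 then (2:Int) ^ ((cnt.modify i (· + 1)).getD m 0).toNat * 2 ^ m else 0)
              + (if m = i then (2:Int) ^ (cnt.getD i 0).toNat * 2 ^ i else 0) := by
          intro m hm
          have hmL := Finset.mem_range.mp hm
          by_cases hmi : m = i
          · subst hmi
            simp [hbit0, (by omega : ¬ m + 1 ≤ m)]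
          · rw [if_neg hmi, add_zero]
            have hgd : (cnt.modify i (· + 1)).getD m 0 = cnt.getD m 0 := by
              rw [List.getD_eq_getElem _ _ (by rw [List.length_modify]; exact hmL),
                  List.getElem_modify, if_neg (fun h => hmi h.symm),
                  ← List.getD_eq_getElem cnt 0 hmL]
            rw [hgd]
            exact (pv_ite_shift i m y _ hmi).symm
        rw [Finset.sum_congr rfl hsum, Finset.sum_add_distrib,
            Finset.sum_ite_eq' (Finset.range cnt.length) i
              (fun _ => (2:Int) ^ (cnt.getD i 0).toNat * 2 ^ i),
            if_pos (Finset.mem_range.mpr hiL), pv_one_shl, Int.shiftLeft_eq]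
        ring
      · have hbit0 : y.testBit 0 = false := by
          rw [Nat.and_one_is_mod] at hb
          rw [Nat.testBit_zero]
          simp [(by omega : y % 2 = 0)]
        rw [if_neg hb, ih _ hlt _ _ _ hLs]
        congr 1
        refine Finset.sum_congr rfl fun m _ => ?_
        by_cases hmi : m = i
        · subst hmi
          rw [if_neg (fun h => (by omega : ¬ m + 1 ≤ m) h.1),
              if_neg (by simp [hbit0])]
        · exact pv_ite_shift i m y _ hmi

-- the running answer's invariant: ans = Φ cnt, where Φ is the closed-form total
def pvPhi (cnt : List Int) : Int :=
  ∑ m ∈ Finset.range 32, ((2:Int) ^ (cnt.getD m 0).toNat - 1) * 2 ^ m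

theorem pvStrip_phi (y : Nat) (ans : Int) (cnt : List Int) (hy : y < 2 ^ 32)
    (hlen : cnt.length = 32) (hnn : ∀ m : Nat, 0 ≤ cnt.getD m 0) (hans : ans = pvPhi cnt) :
    (pvStrip y 0 ans cnt).1 = pvPhi (pvStrip y 0 ans cnt).2 := by
  have hL : y < 2 ^ (cnt.length - 0) := by rw [hlen]; simpa using hy
  rw [pvStrip_fst y 0 ans cnt hL, hans, hlen]
  unfold pvPhi
  rw [← Finset.sum_add_distrib]
  refine Finset.sum_congr rfl fun m hm => ?_
  have hmL : m < cnt.length := by rw [hlen]; exact Finset.mem_range.mp hm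
  rw [pvStrip_getD y 0 _ cnt m hL hmL]
  simp only [Nat.zero_le, true_and, Nat.sub_zero]
  by_cases hbit : y.testBit m
  · rw [if_pos hbit, if_pos hbit]
    have h0 := hnn m
    have ht : (cnt.getD m 0 + 1).toNat = (cnt.getD m 0).toNat + 1 := by omega
    rw [ht, pow_succ]
    ring
  · simp [hbit]

-- the element fold keeps the invariant and counts bits
theorem fold_fst (ys : List Nat) : ∀ (st : Int × List Int),
    (∀ y ∈ ys, y < 2 ^ 32) → st.2.length = 32 → (∀ m : Nat, 0 ≤ st.2.getD m 0) →
    st.1 = pvPhi st.2 →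
    (ys.foldl (fun st y => pvStrip y 0 st.1 st.2) st).1
      = pvPhi (ys.foldl (fun st y => pvStrip y 0 st.1 st.2) st).2 := by
  induction ys with
  | nil => intro st _ _ _ hinv; simpa using hinv
  | cons y ys ih =>
    intro st hys hlen hnn hinv
    rw [List.foldl_cons]
    exact ih _ (fun y' hy' => hys y' (List.mem_cons_of_mem _ hy'))
      (by rw [pvStrip_length]; exact hlen)
      (pvStrip_nonneg y 0 st.1 st.2 hnn)
      (pvStrip_phi y st.1 st.2 (hys y List.mem_cons_self) hlen hnn hinv)

theorem fold_cnt (ys : List Nat) : ∀ (st : Int × List Int) (m : Nat),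
    (∀ y ∈ ys, y < 2 ^ 32) → st.2.length = 32 → m < 32 →
    (ys.foldl (fun st y => pvStrip y 0 st.1 st.2) st).2.getD m 0
      = st.2.getD m 0 + (ys.countP (fun y => y.testBit m) : Int) := by
  induction ys with
  | nil => intro st m _ _ _; simp
  | cons y ys ih =>
    intro st m hys hlen hm
    rw [List.foldl_cons, List.countP_cons,
        ih _ m (fun y' hy' => hys y' (List.mem_cons_of_mem _ hy'))
          (by rw [pvStrip_length]; exact hlen) hm,
        pvStrip_getD y 0 st.1 st.2 m
          (by rw [hlen]; simpa using hys y List.mem_cons_self) (by omega)]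
    by_cases hb : y.testBit m <;> simp [hb] <;> push_cast <;> ring

-- B as the same closed 32-term sum over bit counts of the masked values
theorem andSum_alt_eq_sum (arr : List Int) (n : Int) (hn : n ≤ (arr.length : Int)) :
    andSum_alt arr n = ∑ m ∈ Finset.range 32,
      ((2:Int) ^ (((arr.take n.toNat).map (fun x => (PySem.Int.band x 0xFFFFFFFF).toNat)).countP
          (fun y => y.testBit m)) - 1) * 2 ^ m := by
  unfold andSum_alt
  rw [foldl_pyRange_take arr n hn
      (fun (st : Int × List Int) x =>
        pvStrip (PySem.Int.band x 0xFFFFFFFF).toNat 0 st.1 st.2)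
      ((0 : Int), List.replicate 32 (0 : Int))]
  rw [← List.foldl_map (f := fun x : Int => (PySem.Int.band x 0xFFFFFFFF).toNat)
      (g := fun (st : Int × List Int) y => pvStrip y 0 st.1 st.2)]
  have hys : ∀ y ∈ (arr.take n.toNat).map (fun x => (PySem.Int.band x 0xFFFFFFFF).toNat),
      y < 2 ^ 32 := by
    intro y hy
    rcases List.mem_map.mp hy with ⟨x, _, rfl⟩
    exact pv_mask_lt x
  have hnn : ∀ m : Nat, 0 ≤ (List.replicate 32 (0:Int)).getD m 0 := by
    intro m
    by_cases h : m < 32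
    · rw [List.getD_replicate _ h]
    · rw [List.getD_eq_default _ _ (by simpa using h)]
  have hphi0 : (0:Int) = pvPhi (List.replicate 32 (0:Int)) := by
    symm
    unfold pvPhi
    refine Finset.sum_eq_zero fun m hm => ?_
    rw [List.getD_replicate _ (Finset.mem_range.mp hm)]
    simp
  rw [fold_fst _ _ hys (by simp) hnn hphi0]
  unfold pvPhi
  refine Finset.sum_congr rfl fun m hm => ?_
  have hm32 := Finset.mem_range.mp hm
  rw [fold_cnt _ _ m hys (by simp) hm32, List.getD_replicate _ hm32]
  simp

-- ===== VERDICT (by name: the statement is the Claim_ definition above) =====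
theorem andSum_spec : Claim_equal_andSum := by
  intro arr n _ hpre
  unfold Spec_andSum
  rw [andSum_eq_sum arr n hpre, andSum_alt_eq_sum arr n hpre]
  refine Finset.sum_congr rfl fun m hm => ?_
  have hm32 : m < 32 := Finset.mem_range.mp hm
  have hc : ((arr.take n.toNat).map (fun x => (PySem.Int.band x 0xFFFFFFFF).toNat)).countP
        (fun y => y.testBit m)
      = (arr.take n.toNat).countP (fun x => decide (PySem.Int.band x ((1:Int) <<< m) ≠ 0)) := by
    rw [List.countP_map]
    refine List.countP_congr fun x _ => ?_
    simp only [Function.comp]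
    rw [pv_bridge x m hm32]
  rw [hc]
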